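-- pv_equiv track=rewrite | github.com/kanade00/OpenKG-Harry-Potter | qa/question_processor.py | add_list_info
-- ===== SOURCE A (Python) =====
-- def add_list_info(query_res, answer):
--     count = 0
--     for res in query_res:
--         answer += "{} ".format(res[0])
--         count += 1
--         if count % 5 == 0:
--             answer += "\n"
--     return answer
-- ===== SOURCE B (Python) =====
-- def add_list_info(query_res, answer):
--     tokens = ["{} ".format(res[0]) for res in query_res]
--     while tokens:
--         row, tokens = tokens[:5], tokens[5:]
--         answer += "".join(row)
--         if len(row) == 5:
--             answer += "\n"
--     return answer
-- ===== Notes on version B (the rewrite author's own statement) =====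
-- stated objective: alternative
-- what changed: Replaces A's per-item counter loop (appending one token at a time and testing count % 5) with a tokenize-first pass followed by a chunk-by-5 loop that joins each row at once and appends a newline only after full rows.
import Mathlib
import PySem

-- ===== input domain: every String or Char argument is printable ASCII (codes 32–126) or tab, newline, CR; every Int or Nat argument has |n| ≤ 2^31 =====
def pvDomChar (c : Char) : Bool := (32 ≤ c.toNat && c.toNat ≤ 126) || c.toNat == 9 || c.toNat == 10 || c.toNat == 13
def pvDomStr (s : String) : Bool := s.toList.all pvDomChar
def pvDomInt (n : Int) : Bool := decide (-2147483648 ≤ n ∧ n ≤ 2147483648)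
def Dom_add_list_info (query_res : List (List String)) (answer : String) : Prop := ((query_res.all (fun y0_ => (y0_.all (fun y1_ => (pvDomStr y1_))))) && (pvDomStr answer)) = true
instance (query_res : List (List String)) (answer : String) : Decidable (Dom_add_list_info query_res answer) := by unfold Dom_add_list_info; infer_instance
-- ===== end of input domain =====

-- B replaces A's per-item counter loop with a tokenize-then-chunk-by-5 pass (alternative decomposition, same cost).

-- ===== PORT A =====
-- A's for-loop with the running `count` and `answer`; res[0] = pyGet? (IndexError → excluded by Pre_).
def addListInfoLoopA : List (List String) → Int → String → String
  | [], _, ans => ans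
  | res :: rest, count, ans =>
    let ans := ans ++ ((PySem.List.pyGet? res 0).getD "") ++ " "
    let count := count + 1
    let ans := if PySem.Int.mod count 5 == 0 then ans ++ "\n" else ans
    addListInfoLoopA rest count ans

def add_list_info (query_res : List (List String)) (answer : String) : String :=
  addListInfoLoopA query_res 0 answer

-- ===== PORT B =====
-- B's while-loop over the token list: peel off tokens[:5] / tokens[5:] each round.
def addListInfoLoopB : List String → String → String
  | [], ans => ans
  | t :: ts, ans =>
    let row := (t :: ts).take 5
    let rest := (t :: ts).drop 5
    let ans := ans ++ PySem.Str.join "" row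
    let ans := if row.length == 5 then ans ++ "\n" else ans
    addListInfoLoopB rest ans
termination_by ts _ => ts.length
decreasing_by simp

def add_list_info_alt (query_res : List (List String)) (answer : String) : String :=
  addListInfoLoopB (query_res.map (fun res => ((PySem.List.pyGet? res 0).getD "") ++ " ")) answer

-- ===== PRECONDITION & SPEC =====
-- Pre_ excludes exactly the inputs where A raises IndexError (an empty inner list, res[0]); B raises there too.
def Pre_add_list_info (query_res : List (List String)) (_answer : String) : Prop :=
  ∀ res ∈ query_res, res ≠ []
instance (query_res : List (List String)) (answer : String) : Decidable (Pre_add_list_info query_res answer) := by unfold Pre_add_list_info; infer_instance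

def pvWitness_add_list_info : List (List String) × String := ([["alpha"], ["beta", "x"], ["gamma"]], "ans: ")

def Spec_add_list_info (query_res : List (List String)) (answer : String) (out : String) : Prop := out = add_list_info_alt query_res answer
instance (query_res : List (List String)) (answer : String) (out : String) : Decidable (Spec_add_list_info query_res answer out) := by unfold Spec_add_list_info; infer_instance

-- ===== CLAIM (what is proved, stated in full; the proofs are below) =====
def Claim_equal_add_list_info : Prop := ∀ (query_res : List (List String)) (answer : String), Dom_add_list_info query_res answer → Pre_add_list_info query_res answer → Spec_add_list_info query_res answer (add_list_info query_res answer)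

-- ===== LEMMAS AND PROOFS =====

-- "".join on strings peels off its head.
theorem join_empty_cons (p : String) (ps : List String) :
    PySem.Str.join "" (p :: ps) = p ++ PySem.Str.join "" ps := by
  cases ps with
  | nil =>
    apply String.toList_injective
    simp [PySem.Str.join, PySem.Chars.join, List.intercalate]
  | cons q qs =>
    apply String.toList_injective
    simp [PySem.Str.toList_join, PySem.Chars.join_cons_cons]

theorem join_empty_nil : PySem.Str.join "" [] = "" := by
  apply String.toList_injective
  simp [PySem.Str.join, PySem.Chars.join, List.intercalate]

theorem mod_five (a : Int) : PySem.Int.mod a 5 = a % 5 :=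
  PySem.Int.mod_eq_emod_of_pos (by norm_num)

-- A's loop on fewer than 5 remaining items, with no counter value hitting a multiple of 5:
-- it just appends the tokens.
theorem addListInfoLoopA_small (qr : List (List String)) (c : Int) (ans : String)
    (h : ∀ i : ℕ, 1 ≤ i → i ≤ qr.length → PySem.Int.mod (c + i) 5 ≠ 0) :
    addListInfoLoopA qr c ans
      = ans ++ PySem.Str.join "" (qr.map (fun res => ((PySem.List.pyGet? res 0).getD "") ++ " ")) := by
  induction qr generalizing c ans with
  | nil => simp [addListInfoLoopA, join_empty_nil]
  | cons r rs ih =>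
    have h1 : (PySem.Int.mod (c + 1) 5 == 0) = false := by
      have := h 1 le_rfl (by simp)
      simpa using this
    simp only [addListInfoLoopA, h1, Bool.false_eq_true, if_false]
    rw [ih (c + 1) _ (fun i hi hle => by
      have := h (i + 1) (by omega) (by simp; omega)
      have e : c + 1 + (i : Int) = c + ((i : ℕ) + 1 : ℕ) := by push_cast; ring
      rw [e]; exact this)]
    rw [List.map_cons, join_empty_cons]
    simp [String.append_assoc]

-- Main invariant: starting A's loop at a counter that is a multiple of 5 matches B's chunk loop.
theorem loopA_eq_loopB (n : ℕ) (qr : List (List String)) (c : Int) (ans : String)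
    (hn : qr.length ≤ n) (hc : c % 5 = 0) :
    addListInfoLoopA qr c ans
      = addListInfoLoopB (qr.map (fun res => ((PySem.List.pyGet? res 0).getD "") ++ " ")) ans := by
  induction n generalizing qr c ans with
  | zero =>
    have : qr = [] := List.eq_nil_of_length_eq_zero (by omega)
    subst this
    simp [addListInfoLoopA, addListInfoLoopB]
  | succ n ih =>
    match qr with
    | [] => simp [addListInfoLoopA, addListInfoLoopB]
    | r1 :: r2 :: r3 :: r4 :: r5 :: rest =>
      -- five A-steps: counters c+1 … c+4 miss a multiple of 5, c+5 hits one
      have m1 : (PySem.Int.mod (c + 1) 5 == 0) = false := by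
        rw [mod_five]; simp; omega
      have m2 : (PySem.Int.mod (c + 1 + 1) 5 == 0) = false := by
        rw [mod_five]; simp; omega
      have m3 : (PySem.Int.mod (c + 1 + 1 + 1) 5 == 0) = false := by
        rw [mod_five]; simp; omega
      have m4 : (PySem.Int.mod (c + 1 + 1 + 1 + 1) 5 == 0) = false := by
        rw [mod_five]; simp; omega
      have m5 : (PySem.Int.mod (c + 1 + 1 + 1 + 1 + 1) 5 == 0) = true := by
        rw [mod_five]; simp; omega
      simp only [addListInfoLoopA, m1, m2, m3, m4, m5, Bool.false_eq_true, if_false, if_true]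
      rw [ih rest (c + 1 + 1 + 1 + 1 + 1) _ (by simp at hn ⊢; omega) (by omega)]
      simp only [List.map_cons, addListInfoLoopB, List.take, List.drop,
        join_empty_cons, join_empty_nil, List.length_cons, List.length_nil]
      norm_num [String.append_assoc]
    | r1 :: r2 :: r3 :: r4 :: [] | r1 :: r2 :: r3 :: [] | r1 :: r2 :: [] | r1 :: [] =>
      rw [addListInfoLoopA_small _ c ans (fun i hi hle => by
        rw [mod_five]
        simp at hle ⊢
        omega)]
      simp only [List.map_cons, List.map_nil, addListInfoLoopB, List.take, List.drop,
        join_empty_cons, join_empty_nil, List.length_cons, List.length_nil]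
      norm_num [String.append_assoc, addListInfoLoopB]

-- ===== VERDICT (by name: the statement is the Claim_ definition above) =====
theorem add_list_info_spec : Claim_equal_add_list_info := by
  intro qr ans _ _
  unfold Spec_add_list_info add_list_info add_list_info_alt
  exact loopA_eq_loopB qr.length qr 0 ans le_rfl (by decide)
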